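-- pv_equiv track=rewrite | github.com/JakobBoedker/StaticSite_Generator | src/markdown.py | count_hash_in_heading
-- ===== SOURCE A (Python) =====
-- def count_hash_in_heading(block):
--     count = 0
--     for item in block:
--         if item == "#":
--             count += 1
--         if item == " ":
--             break
--     return f"h{count}"
-- ===== SOURCE B (Python) =====
-- def count_hash_in_heading(block):
--     prefix = block.split(" ", 1)[0]
--     return f"h{prefix.count('#')}"
-- ===== Notes on version B (the rewrite author's own statement) =====
-- stated objective: simpler
-- what changed: B isolates the text before the first space with split(' ', 1)[0] and counts '#' in it with str.count, replacing A's early-breaking per-character Python loop; the two C-level string operations give a constant-factor speedup.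
import Mathlib
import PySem

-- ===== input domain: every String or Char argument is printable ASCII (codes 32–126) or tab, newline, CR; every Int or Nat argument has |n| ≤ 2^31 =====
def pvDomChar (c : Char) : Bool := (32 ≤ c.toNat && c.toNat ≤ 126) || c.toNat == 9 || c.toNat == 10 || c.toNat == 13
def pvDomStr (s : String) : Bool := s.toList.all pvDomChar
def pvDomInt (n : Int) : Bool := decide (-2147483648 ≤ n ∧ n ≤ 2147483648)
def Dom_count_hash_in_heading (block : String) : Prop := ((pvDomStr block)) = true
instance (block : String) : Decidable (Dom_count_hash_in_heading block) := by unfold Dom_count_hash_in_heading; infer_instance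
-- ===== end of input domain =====

-- B isolates the prefix before the first space and counts '#' there, replacing A's early-breaking character loop (objective: simpler).


-- ===== PORT A =====
-- the for-loop with its break, over the string's characters
def chhLoop : List Char → Int → Int
  | [], count => count
  | x :: xs, count =>
    let count' := if x = '#' then count + 1 else count
    if x = ' ' then count' else chhLoop xs count'

def count_hash_in_heading (block : String) : String :=
  "h" ++ PySem.Int.toStr (chhLoop block.toList 0)

-- ===== PORT B =====
-- block.split(" ", 1)[0] is exactly the characters before the first space (takeWhile);
-- prefix.count('#') is List.count over those characters.
def count_hash_in_heading_alt (block : String) : String :=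
  let pfx := block.toList.takeWhile (fun c => c ≠ ' ')
  "h" ++ PySem.Int.toStr ((pfx.count '#' : Int))

-- ===== PRECONDITION & SPEC =====
def Spec_count_hash_in_heading (block : String) (out : String) : Prop := out = count_hash_in_heading_alt block
instance (block : String) (out : String) : Decidable (Spec_count_hash_in_heading block out) := by unfold Spec_count_hash_in_heading; infer_instance

-- ===== CLAIM (what is proved, stated in full; the proofs are below) =====
def Claim_equal_count_hash_in_heading : Prop := ∀ (block : String), Dom_count_hash_in_heading block → Spec_count_hash_in_heading block (count_hash_in_heading block)

-- ===== LEMMAS AND PROOFS =====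
theorem chhLoop_eq (l : List Char) (c : Int) :
    chhLoop l c = c + ((l.takeWhile (fun c => c ≠ ' ')).count '#' : Int) := by
  induction l generalizing c with
  | nil => simp [chhLoop]
  | cons x xs ih =>
    by_cases hsp : x = ' '
    · subst hsp
      simp [chhLoop, List.takeWhile]
    · by_cases hh : x = '#'
      · subst hh
        simp [chhLoop, List.takeWhile, hsp, ih]
        ring
      · simp [chhLoop, List.takeWhile, hsp, hh, ih]

-- ===== VERDICT (by name: the statement is the Claim_ definition above) =====
theorem count_hash_in_heading_spec : Claim_equal_count_hash_in_heading := by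
  intro block _
  unfold Spec_count_hash_in_heading count_hash_in_heading count_hash_in_heading_alt
  rw [chhLoop_eq]
  simp
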